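-- pv_equiv track=rewrite | github.com/Itish2003/FableWeaver | tests/test_runner.py | _check_no_ambient_effects
-- ===== SOURCE A (Python) =====
-- def _check_no_ambient_effects(text: str) -> bool:
--     """Validate that no ambient curse effects appeared."""
--     effect_keywords = [
--         "curse aura",
--         "spiritual pressure",
--         "energy leak",
--         "contamination",
--         "manifestation",
--     ]
--     text_lower = text.lower()
--     return not any(kw in text_lower for kw in effect_keywords)
-- ===== SOURCE B (Python) =====
-- def _check_no_ambient_effects(text: str) -> bool:
--     """Validate that no ambient curse effects appeared (single left-to-right scan)."""
--     keywords = (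
--         "curse aura",
--         "spiritual pressure",
--         "energy leak",
--         "contamination",
--         "manifestation",
--     )
--     t = text.lower()
--     for i in range(len(t)):
--         for kw in keywords:
--             if t.startswith(kw, i):
--                 return False
--     return True
-- ===== Notes on version B (the rewrite author's own statement) =====
-- stated objective: alternative
-- what changed: Replaces five independent substring membership scans over the lowered text with one left-to-right pass that tests at each position whether any keyword starts there.
import Mathlib
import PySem

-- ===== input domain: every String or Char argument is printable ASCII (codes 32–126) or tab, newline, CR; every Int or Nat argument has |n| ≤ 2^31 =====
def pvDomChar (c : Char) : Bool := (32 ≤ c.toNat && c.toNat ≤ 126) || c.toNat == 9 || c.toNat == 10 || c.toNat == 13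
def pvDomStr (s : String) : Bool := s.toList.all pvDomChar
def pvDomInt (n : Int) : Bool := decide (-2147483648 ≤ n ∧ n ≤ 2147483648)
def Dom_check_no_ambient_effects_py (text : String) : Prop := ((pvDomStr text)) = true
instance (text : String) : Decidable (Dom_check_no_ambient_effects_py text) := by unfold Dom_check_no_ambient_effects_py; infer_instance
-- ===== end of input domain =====

-- B replaces A's five independent substring scans with one left-to-right pass over the
-- lowered text that at each position tests whether any keyword starts there (objective: alternative).

-- ===== PORT A =====
def check_no_ambient_effects_py (text : String) : Bool :=
  let effect_keywords : List String :=
    ["curse aura", "spiritual pressure", "energy leak", "contamination", "manifestation"]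
  let text_lower := PySem.Str.lower text
  ! (effect_keywords.any (fun kw => PySem.Str.isIn kw text_lower))

-- ===== PORT B =====
-- the inner 'for kw in keywords: if t.startswith(kw, i): return False' loop at one position i
def pvHitHere (keywords : List (List Char)) (suffix : List Char) : Bool :=
  keywords.any (fun kw => PySem.Chars.startswith suffix kw)

-- the outer 'for i in range(len(t))' loop: walk the suffixes of t left to right
def pvScan (keywords : List (List Char)) : List Char → Bool
  | [] => true
  | c :: rest => if pvHitHere keywords (c :: rest) then false else pvScan keywords rest

def check_no_ambient_effects_py_alt (text : String) : Bool :=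
  let keywords : List (List Char) :=
    ["curse aura".toList, "spiritual pressure".toList, "energy leak".toList,
     "contamination".toList, "manifestation".toList]
  pvScan keywords (PySem.Str.lower text).toList

-- ===== PRECONDITION & SPEC =====
def Spec_check_no_ambient_effects_py (text : String) (out : Bool) : Prop := out = check_no_ambient_effects_py_alt text
instance (text : String) (out : Bool) : Decidable (Spec_check_no_ambient_effects_py text out) := by unfold Spec_check_no_ambient_effects_py; infer_instance

-- ===== CLAIM (what is proved, stated in full; the proofs are below) =====
def Claim_equal_check_no_ambient_effects_py : Prop := ∀ (text : String), Dom_check_no_ambient_effects_py text → Spec_check_no_ambient_effects_py text (check_no_ambient_effects_py text)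

-- ===== LEMMAS AND PROOFS =====
theorem pvScan_eq_true_iff (kws : List (List Char)) (t : List Char)
    (hne : ∀ kw ∈ kws, kw ≠ []) :
    pvScan kws t = true ↔ ∀ kw ∈ kws, ¬ kw <:+: t := by
  induction t with
  | nil =>
    simp [pvScan]
    intro kw hkw h
    exact hne kw hkw h
  | cons c rest ih =>
    simp only [pvScan, pvHitHere]
    by_cases h : ∃ kw ∈ kws, PySem.Chars.startswith (c :: rest) kw = true
    · obtain ⟨kw, hkw, hs⟩ := h
      rw [PySem.Chars.startswith_iff] at hs
      simp only [List.any_eq_true]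
      rw [if_pos ⟨kw, hkw, by rw [PySem.Chars.startswith_iff]; exact hs⟩]
      constructor
      · intro hfalse; cases hfalse
      · intro hall; exact absurd hs.isInfix (hall kw hkw)
    · rw [if_neg (by simpa using h)]
      rw [ih]
      constructor
      · intro hall kw hkw hinf
        rcases List.infix_cons_iff.mp hinf with hpre | hinf'
        · exact h ⟨kw, hkw, by rw [PySem.Chars.startswith_iff]; exact hpre⟩
        · exact hall kw hkw hinf'
      · intro hall kw hkw hinf
        exact hall kw hkw (List.infix_cons_iff.mpr (Or.inr hinf))

-- ===== VERDICT (by name: the statement is the Claim_ definition above) =====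
theorem check_no_ambient_effects_py_spec : Claim_equal_check_no_ambient_effects_py := by
  intro text _
  unfold Spec_check_no_ambient_effects_py
  unfold check_no_ambient_effects_py check_no_ambient_effects_py_alt
  rw [Bool.eq_iff_iff]
  rw [pvScan_eq_true_iff _ _ (by decide)]
  simp [PySem.Chars.isIn_eq_false_iff]
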